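-- pv_equiv track=rewrite | github.com/rp1405/v2vRag | backend/services/ragService.py | _fix_leading_punctuation
-- ===== SOURCE A (Python) =====
-- def _fix_leading_punctuation(chunks):
--     fixed_chunks = []
--     for chunk in chunks:
--         if fixed_chunks and chunk and chunk[0] in ".!?":
--             # Move punctuation to end of previous chunk
--             fixed_chunks[-1] += chunk[0]
--             chunk = chunk[1:]
--         chunk = chunk.strip()
--         fixed_chunks.append(chunk)
--     return fixed_chunks
-- ===== SOURCE B (Python) =====
-- def _fix_leading_punctuation(chunks):
--     # Stateless formulation: each output element is computed locally from its own
--     # chunk (dropping a donated leading punctuation char) plus the leading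
--     # punctuation of the NEXT chunk, via a zip with the shifted list -- no
--     # in-place mutation of previously emitted elements.
--     def takes(c):
--         return bool(c) and c[0] in ".!?"
--
--     def don(nxt):
--         return nxt[0] if takes(nxt) else ""
--
--     if not chunks:
--         return []
--     shifted = chunks[1:] + [""]
--     out = [chunks[0].strip() + don(shifted[0])]
--     for c, nxt in zip(chunks[1:], shifted[1:]):
--         out.append((c[1:] if takes(c) else c).strip() + don(nxt))
--     return out
-- ===== Notes on version B (the rewrite author's own statement) =====
-- stated objective: alternative
-- what changed: Replaces A's single pass that mutates an accumulator list (appending donated punctuation to the previous element in place) by a stateless structural recursion that builds each output element locally from its own chunk and the next chunk's leading punctuation.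
import Mathlib
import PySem

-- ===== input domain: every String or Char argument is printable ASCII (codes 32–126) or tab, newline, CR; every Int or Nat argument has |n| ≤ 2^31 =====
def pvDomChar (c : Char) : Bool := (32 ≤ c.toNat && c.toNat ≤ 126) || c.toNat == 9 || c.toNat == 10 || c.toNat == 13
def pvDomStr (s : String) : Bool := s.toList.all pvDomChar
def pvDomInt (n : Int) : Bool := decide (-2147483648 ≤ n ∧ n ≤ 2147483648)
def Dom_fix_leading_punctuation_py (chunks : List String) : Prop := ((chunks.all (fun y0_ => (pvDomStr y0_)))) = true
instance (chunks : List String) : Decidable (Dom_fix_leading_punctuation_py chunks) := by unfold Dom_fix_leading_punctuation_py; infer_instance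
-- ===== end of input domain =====

-- B replaces A's accumulator-mutating pass (append to previous element in place) by a
-- stateless structural recursion computing each output element locally from its chunk
-- and the next chunk's leading punctuation (objective: alternative decomposition).


-- ===== PORT A =====
-- `fixed_chunks[-1] += chunk[0]`: in-place update of the last element of a nonempty
-- list, transcribed as a structural "modify last" helper (exact for nonempty lists;
-- A's guard `fixed_chunks and …` ensures nonemptiness).
def pvModLastA (s : String) : List String → List String
  | [] => []
  | [x] => [x ++ s]
  | x :: xs => x :: pvModLastA s xs

-- one iteration of A's `for chunk in chunks` body; `chunk[0] in ".!?"` is the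
-- membership of the first code point in ['.','!','?'], `chunk[1:]` drops it.
def pvStepA (fixed : List String) (chunk : String) : List String :=
  if fixed ≠ [] ∧ chunk ≠ "" ∧ chunk.toList.headI ∈ ['.', '!', '?'] then
    pvModLastA (String.ofList (chunk.toList.take 1)) fixed ++
      [PySem.Str.strip (String.ofList (chunk.toList.drop 1))]
  else
    fixed ++ [PySem.Str.strip chunk]

def fix_leading_punctuation_py (chunks : List String) : List String :=
  chunks.foldl pvStepA []

-- ===== PORT B =====
-- Source B's `takes(c)`: c is nonempty and its first char is one of ".!?"
def pvTakes (c : String) : Bool :=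
  decide (c ≠ "") && decide (c.toList.headI ∈ ['.', '!', '?'])

-- Source B's `don(nxt)`: `nxt[0] if takes(nxt) else ""`
def pvDonB (nxt : String) : String :=
  if pvTakes nxt then String.ofList (nxt.toList.take 1) else ""

-- the loop body's appended element, for one pair (c, nxt) of the zip
def pvRowB (p : String × String) : String :=
  PySem.Str.strip (if pvTakes p.1 then String.ofList (p.1.toList.drop 1) else p.1) ++ pvDonB p.2

def fix_leading_punctuation_py_alt (chunks : List String) : List String :=
  match chunks with
  | [] => []
  | c :: rest =>
    -- shifted = chunks[1:] + [""]; out starts with chunks[0].strip() + don(shifted[0]);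
    -- then the for-loop over zip(chunks[1:], shifted[1:]) appends one row per pair
    let shifted := rest ++ [""]
    (rest.zip (shifted.drop 1)).foldl (fun out p => out ++ [pvRowB p])
      [PySem.Str.strip c ++ pvDonB shifted.headI]

-- ===== PRECONDITION & SPEC =====
def Spec_fix_leading_punctuation_py (chunks : List String) (out : List String) : Prop := out = fix_leading_punctuation_py_alt chunks
instance (chunks : List String) (out : List String) : Decidable (Spec_fix_leading_punctuation_py chunks out) := by unfold Spec_fix_leading_punctuation_py; infer_instance

-- ===== CLAIM (what is proved, stated in full; the proofs are below) =====
def Claim_equal_fix_leading_punctuation_py : Prop := ∀ (chunks : List String), Dom_fix_leading_punctuation_py chunks → Spec_fix_leading_punctuation_py chunks (fix_leading_punctuation_py chunks)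

-- ===== LEMMAS AND PROOFS =====

-- common normal form of both programs on the tail of the input
def pvAttach (x : String) : List String → List String
  | [] => [x]
  | c :: rs =>
    if pvTakes c then
      (x ++ String.ofList (c.toList.take 1)) :: pvAttach (PySem.Str.strip (String.ofList (c.toList.drop 1))) rs
    else
      x :: pvAttach (PySem.Str.strip c) rs

lemma pvModLastA_concat (s : String) (acc : List String) (x : String) :
    pvModLastA s (acc ++ [x]) = acc ++ [x ++ s] := by
  induction acc with
  | nil => simp [pvModLastA]
  | cons a as ih =>
    cases as with
    | nil => simp [pvModLastA]
    | cons b bs =>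
      simpa [pvModLastA] using ih

lemma pvFoldA_attach (l : List String) :
    ∀ (acc : List String) (x : String),
      l.foldl pvStepA (acc ++ [x]) = acc ++ pvAttach x l := by
  induction l with
  | nil => intro acc x; simp [pvAttach]
  | cons c rest ih =>
    intro acc x
    by_cases h : c ≠ "" ∧ c.toList.headI ∈ ['.', '!', '?']
    · have hs : pvStepA (acc ++ [x]) c =
          (acc ++ [x ++ String.ofList (c.toList.take 1)]) ++
            [PySem.Str.strip (String.ofList (c.toList.drop 1))] := by
        simp [pvStepA, h.1, h.2, pvModLastA_concat]
      have ht : pvTakes c = true := by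
        simp [pvTakes, h.1, h.2]
      calc (c :: rest).foldl pvStepA (acc ++ [x])
          = rest.foldl pvStepA ((acc ++ [x ++ String.ofList (c.toList.take 1)]) ++
              [PySem.Str.strip (String.ofList (c.toList.drop 1))]) := by
            simp [List.foldl_cons, hs]
        _ = (acc ++ [x ++ String.ofList (c.toList.take 1)]) ++
              pvAttach (PySem.Str.strip (String.ofList (c.toList.drop 1))) rest := ih _ _
        _ = acc ++ pvAttach x (c :: rest) := by
            simp [pvAttach, ht]
    · have ht : pvTakes c = false := by
        by_contra hc
        have : pvTakes c = true := by simpa using hc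
        simp [pvTakes] at this
        exact h ⟨this.1, by simpa using this.2⟩
      have hs : pvStepA (acc ++ [x]) c = (acc ++ [x]) ++ [PySem.Str.strip c] := by
        simp [pvStepA]
        intro h1 h2
        exact absurd ⟨h1, by simpa using h2⟩ h
      calc (c :: rest).foldl pvStepA (acc ++ [x])
          = rest.foldl pvStepA ((acc ++ [x]) ++ [PySem.Str.strip c]) := by
            simp [List.foldl_cons, hs]
        _ = (acc ++ [x]) ++ pvAttach (PySem.Str.strip c) rest := ih _ _
        _ = acc ++ pvAttach x (c :: rest) := by
            simp [pvAttach, ht]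

lemma pvFoldB_map (l : List (String × String)) (init : List String) :
    l.foldl (fun out p => out ++ [pvRowB p]) init = init ++ l.map pvRowB := by
  induction l generalizing init with
  | nil => simp
  | cons p ps ih => simp [List.foldl_cons, ih]

lemma pvAttach_eq_rows (l : List String) :
    ∀ (x : String),
      pvAttach x l =
        (x ++ pvDonB ((l ++ [""]).headI)) :: (l.zip ((l ++ [""]).drop 1)).map pvRowB := by
  induction l with
  | nil =>
    intro x
    simp [pvAttach, pvDonB, pvTakes]
  | cons c rs ih =>
    intro x
    cases rs with
    | nil =>
      by_cases h : pvTakes c = true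
      · simp [pvAttach, pvDonB, pvRowB, h]
      · simp at h
        simp [pvAttach, pvDonB, pvRowB, h]
    | cons r rs' =>
      by_cases h : pvTakes c = true
      · simpa [pvAttach, pvDonB, pvRowB, h] using ih _
      · simp at h
        simpa [pvAttach, pvDonB, pvRowB, h] using ih _

-- ===== VERDICT (by name: the statement is the Claim_ definition above) =====
theorem fix_leading_punctuation_py_spec : Claim_equal_fix_leading_punctuation_py := by
  intro chunks _
  unfold Spec_fix_leading_punctuation_py
  cases chunks with
  | nil => rfl
  | cons c rest =>
    have hA : fix_leading_punctuation_py (c :: rest) =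
        pvAttach (PySem.Str.strip c) rest := by
      have h0 : pvStepA [] c = [] ++ [PySem.Str.strip c] := by
        simp [pvStepA]
      calc fix_leading_punctuation_py (c :: rest)
          = rest.foldl pvStepA ([] ++ [PySem.Str.strip c]) := by
            simp [fix_leading_punctuation_py, List.foldl_cons, h0]
        _ = [] ++ pvAttach (PySem.Str.strip c) rest := pvFoldA_attach rest [] _
        _ = pvAttach (PySem.Str.strip c) rest := by simp
    have hB : fix_leading_punctuation_py_alt (c :: rest) =
        pvAttach (PySem.Str.strip c) rest := by
      simp only [fix_leading_punctuation_py_alt, pvFoldB_map]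
      rw [pvAttach_eq_rows rest (PySem.Str.strip c)]
      rfl
    rw [hA, hB]
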